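/- GENERATED by mk_final_copies.py from the proof of the farm's unit `range_bad` (farm:range_bad.1: Proof.lean) as the
   re-elaboration sweep compiled it — do not edit. -/
import Asan.CheckWalk
import Vorbis.Spec.Units.range_bad

open X86 X86.User Asan Vorbis

set_option maxRecDepth 4000
set_option maxHeartbeats 4000000

namespace Vorbis.Spec.range_bad

/-- The shadow byte the loop of `range_bad` tests (0x100231 `cmp byte [rdi + C00000H], 0`, rdi the granule NUMBER `g`, not an
address shifted on the spot as in the small check routines: `Asan.readLE_shadow` does not apply). -/
theorem readLE_granule (mem : Mem) (g : Nat) (hg : g < 0x200000) :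
    mem.readLE (UInt64.ofNat g + 12582912) 1 = shadowOf mem g := by
  have e : (UInt64.ofNat g + 12582912 : Word) = shadowAddr g := by
    apply eq_shadowAddr
    u_omega
  rw [e, readLE_shadowAddr]

/-- What `cmp al, dl ; setle al ; movzx eax, al` leaves in rax (0x10024e … 0x100253, asan_rt.c:37
`return (signed char) (addr & 7) >= s`), for al the shadow byte `s` and dl = `last & 7`: 1 if `s ≤ last % 8` as SIGNED bytes
(`s` negative, or not greater than the offset of the byte in its granule), else 0. -/
theorem setle_value (f : Flags) (s : Nat) (hs : s < 256) (x : Word) :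
    (Word.ofBV (BitVec.zeroExtend 32
      (if Cond.le.holds (f.setStatus (Alu.sub (BitVec.setWidth 8 (BitVec.zeroExtend 32 (BitVec.ofNat 8 s)))
          (BitVec.setWidth 8 (Word.part Width.w32 x &&& 7#32))).flags) = true then (1 : BitVec 8) else 0))).toNat =
      if 128 ≤ s ∨ s ≤ x.toNat % 8 then 1 else 0 := by
  have hc : (Cond.le.holds (f.setStatus (Alu.sub (BitVec.setWidth 8 (BitVec.zeroExtend 32 (BitVec.ofNat 8 s)))
      (BitVec.setWidth 8 (Word.part Width.w32 x &&& 7#32))).flags) = true) ↔ (128 ≤ s ∨ s ≤ x.toNat % 8) := by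
    rw [X86.Cond.le_sub, X86.Cond.sle_eq_decide_toInt, decide_eq_true_eq, byte_toInt _ hs, and7_toInt, part32_toNat]
    omega
  by_cases h : 128 ≤ s ∨ s ≤ x.toNat % 8
  · rw [if_pos (hc.mpr h), if_pos h]
    rfl
  · rw [if_neg (fun hh => h (hc.mp hh)), if_neg h]
    rfl

/-- The state after any of the five `ret`s of `range_bad` is `Returned`, given the post: nothing was stored, only rax rdx rdi
rsp were written. (`v_returned` names its holes, so it can be used once per proof: here, for all five.) -/
theorem returned_of {u₀ u v : State} {ret : Word} {S : List Reg} (w_rip : v.rip = ret)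
    (w_rsp : v.reg .rsp = u.reg .rsp + 8) (w_kept : RegsKept S u v)
    (hS : S.all (fun s => s.isIn [.rax, .rdx, .rdi, .rsp]) = true) (w_mem : v.mem = u.mem)
    (w_eq : Mem.EqOn L.textLo L.textHi u₀.mem v.mem) (hdf : v.flags .df = false)
    (hmx : v.mxcsr &&& 0x1F80 = 0x1F80) (hpost : rangeBadSpec.post u v) :
    Returned (conv u₀) rangeBadSpec u ret v := by
  replace w_kept := w_kept.mono_all hS
  v_returned
  exact hpost

/-- The post of `rangeBadSpec` on a path that returns 1: the range is not accessible. -/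
theorem post_bad {u v : State} {S : List Reg} (hmem : v.mem = u.mem) (hkept : RegsKept S u v)
    (hS : S.all (fun s => s.isIn clobN) = true) (hzmm : v.zmm = u.zmm) (hmx : v.mxcsr = u.mxcsr)
    (hrax : (v.reg .rax).toNat = 1)
    (hnot : ¬ Accessible u.mem (u.reg .rdi).toNat (u.reg .rsi).toNat) : rangeBadSpec.post u v := by
  refine ⟨hmem, ⟨hkept.mono_all hS, hzmm, hmx⟩, ?_, ?_⟩
  · omega
  · constructor
    · intro h0
      omega
    · intro hacc
      exact absurd hacc hnot

/-- The post of `rangeBadSpec` on a path that returns 0: the range is accessible. -/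
theorem post_good {u v : State} {S : List Reg} (hmem : v.mem = u.mem) (hkept : RegsKept S u v)
    (hS : S.all (fun s => s.isIn clobN) = true) (hzmm : v.zmm = u.zmm) (hmx : v.mxcsr = u.mxcsr)
    (hrax : (v.reg .rax).toNat = 0)
    (hacc : Accessible u.mem (u.reg .rdi).toNat (u.reg .rsi).toNat) : rangeBadSpec.post u v := by
  refine ⟨hmem, ⟨hkept.mono_all hS, hzmm, hmx⟩, ?_, ?_⟩
  · omega
  · exact ⟨fun _ => hacc, fun _ => hrax⟩

end Vorbis.Spec.range_bad

/-- `range_bad(a, n)`, `n ≥ 1`, satisfies its contract `Asan.rangeBadSpec`: two guards, a loop over the granules before the last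
one (no store, one shadow read per round), the byte test of the last byte; five `ret`s. The proof is the definition of
`Asan.Accessible` read off the paths. -/
theorem Vorbis.Spec.Worked.range_bad_ok : Vorbis.Spec.range_bad.Statement := by
  intro Lay hLay μ hμ u₀ hcode u ret he hpre
  v_entry he
  -- (a fact about the vector registers, so that the walk tracks them: the post's `Keeps` wants `v.zmm = u.zmm`)
  have hzmm : u.zmm = u.zmm := rfl
  have hn : 1 ≤ (u.reg .rsi).toNat := hpre
  u_walk hcode [hμ.vendor] until [Vorbis.L.range_bad.loop1] span [Vorbis.L.textLo, Vorbis.L.textHi] side (v_side)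
  · -- 0x10025c, asan_rt.c:63 `if (addr >= MEM_TOP) return 1`: `Accessible.top` fails
    have hdf : s_10025c.flags .df = false := by
      rw [w_flags]
      simp only [X86.User.df_setStatus]
      exact he_df
    have hmx : s_10025c.mxcsr &&& 0x1F80 = 0x1F80 := by
      rw [w_mxcsr]
      exact he_mx
    have hrax : (s_10025c.reg .rax).toNat = 1 := by
      rw [w_rax]
      rfl
    refine ReachVia.done (Vorbis.Spec.range_bad.returned_of w_rip w_rsp w_kept (by rfl) w_mem w_eq hdf hmx ?_)
    refine Vorbis.Spec.range_bad.post_bad w_mem w_kept (by rfl) w_zmm w_mxcsr hrax ?_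
    intro hacc
    have htop := hacc.top
    omega
  · -- 0x100262, asan_rt.c:66 `if (size > MEM_TOP - addr) return 1`: `Accessible.top` fails
    have hsub : (16777216 - u.reg .rdi).toNat = 16777216 - (u.reg .rdi).toNat := by u_omega
    have hdf : s_100262.flags .df = false := by
      rw [w_flags]
      simp only [X86.User.df_setStatus]
      exact he_df
    have hmx : s_100262.mxcsr &&& 0x1F80 = 0x1F80 := by
      rw [w_mxcsr]
      exact he_mx
    have hrax : (s_100262.reg .rax).toNat = 1 := by
      rw [w_rax]
      rfl
    refine ReachVia.done (Vorbis.Spec.range_bad.returned_of w_rip w_rsp w_kept (by rfl) w_mem w_eq hdf hmx ?_)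
    refine Vorbis.Spec.range_bad.post_bad w_mem w_kept (by rfl) w_zmm w_mxcsr hrax ?_
    intro hacc
    have htop := hacc.top
    omega
  · -- 0x100225, asan_rt.c:68, the loop head `for (g = addr >> 3; g < (last >> 3); g++)`: both guards passed, so
    -- `last = addr + size - 1` did not wrap and lies below 16 MB
    have hsub : (16777216 - u.reg .rdi).toNat = 16777216 - (u.reg .rdi).toNat := by u_omega
    rw [hsub] at hbr_100219
    have hlast : (u.reg .rdi + u.reg .rsi - 1).toNat = (u.reg .rdi).toNat + (u.reg .rsi).toNat - 1 := by u_omega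
    -- the invariant: rdi = g, a granule from the first to the last of the range; every granule before it has shadow 0
    obtain ⟨g, hg, hg1, hg2, hfull⟩ : ∃ g : Nat, s_10021f.reg .rdi = UInt64.ofNat g ∧ (u.reg .rdi).toNat / 8 ≤ g ∧
        g ≤ ((u.reg .rdi).toNat + (u.reg .rsi).toNat - 1) / 8 ∧
        ∀ j, (u.reg .rdi).toNat / 8 ≤ j → j < g → shadowOf u.mem j = 0 := by
      refine ⟨(u.reg .rdi).toNat / 8, ?_, Nat.le_refl _, by omega, fun j h1 h2 => absurd h2 (by omega)⟩
      rw [w_rdi]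
      apply UInt64.toNat_inj.mp
      rw [toNat_shr3]
      u_omega
    have hdf : s_10021f.flags .df = false := by
      rw [w_flags]
      simp only [X86.User.df_setStatus]
      exact he_df
    have hmx : u.mxcsr &&& 0x1F80 = 0x1F80 := he_mx
    -- (`w_mem : s.mem = u.mem`, `w_mxcsr`, `w_zmm`, `w_rdx`, `w_kept`, `w_eq` stay: the body stores nothing and writes rdi rax only)
    clear w_flags w_rdi w_rax
    u_loop [g] (fun v => ((u.reg .rdi).toNat + (u.reg .rsi).toNat - 1) / 8 - (v.reg .rdi).toNat)
    u_walk hcode [hμ.vendor] until [Vorbis.L.range_bad.loop1] span [Vorbis.L.textLo, Vorbis.L.textHi] side (v_side)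
    · -- 0x100268, asan_rt.c:35 `if (s == 0) return 0` (loop left at 0x10022f with g = last >> 3): accessible
      have hgn : (UInt64.ofNat g).toNat = g := by u_omega
      rw [hgn, toNat_shr3, hlast] at hbr_10022f
      have hs := shadowOf_lt u.mem ((u.reg .rdi + u.reg .rsi - 1).toNat / 8)
      rw [readLE_shadow, byte_toNat _ hs, hlast] at hbr_100249
      have hdf' : s_100268.flags .df = false := by
        rw [w_flags]
        simp only [X86.User.df_setStatus]
        exact hdf
      have hmx' : s_100268.mxcsr &&& 0x1F80 = 0x1F80 := by
        rw [w_mxcsr]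
        exact hmx
      have hrax : (s_100268.reg .rax).toNat = 0 := by
        rw [w_rax]
        rfl
      refine ReachVia.done (Or.inl ?_)
      refine Vorbis.Spec.range_bad.returned_of w_rip w_rsp w_kept (by rfl) w_mem w_eq hdf' hmx' ?_
      refine Vorbis.Spec.range_bad.post_good w_mem w_kept (by rfl) w_zmm w_mxcsr hrax ?_
      refine ⟨by omega, ?_, ?_⟩
      · intro j hj1 hj2
        exact hfull j hj1 (by omega)
      · unfold ByteOK ByteOKv shadowByte
        exact Or.inl hbr_100249
    · -- 0x100256, asan_rt.c:37 `return (signed char) (addr & 7) >= s` (loop left at 0x10022f, the last shadow byte is not 0)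
      have hgn : (UInt64.ofNat g).toNat = g := by u_omega
      rw [hgn, toNat_shr3, hlast] at hbr_10022f
      have hs := shadowOf_lt u.mem ((u.reg .rdi + u.reg .rsi - 1).toNat / 8)
      rw [readLE_shadow, byte_toNat _ hs, hlast] at hbr_100249
      have hdf' : s_100256.flags .df = false := by
        rw [w_flags]
        simp only [X86.User.df_setStatus]
        exact hdf
      have hmx' : s_100256.mxcsr &&& 0x1F80 = 0x1F80 := by
        rw [w_mxcsr]
        exact hmx
      have hrax : (s_100256.reg .rax).toNat =
          if 128 ≤ shadowOf u.mem (((u.reg .rdi).toNat + (u.reg .rsi).toNat - 1) / 8) ∨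
            shadowOf u.mem (((u.reg .rdi).toNat + (u.reg .rsi).toNat - 1) / 8) ≤
              ((u.reg .rdi).toNat + (u.reg .rsi).toNat - 1) % 8 then 1 else 0 := by
        rw [w_rax, readLE_shadow, Vorbis.Spec.range_bad.setle_value _ _ hs, hlast]
      refine ReachVia.done (Or.inl ?_)
      refine Vorbis.Spec.range_bad.returned_of w_rip w_rsp w_kept (by rfl) w_mem w_eq hdf' hmx' ?_
      by_cases hle : 128 ≤ shadowOf u.mem (((u.reg .rdi).toNat + (u.reg .rsi).toNat - 1) / 8) ∨
          shadowOf u.mem (((u.reg .rdi).toNat + (u.reg .rsi).toNat - 1) / 8) ≤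
            ((u.reg .rdi).toNat + (u.reg .rsi).toNat - 1) % 8
      · -- the last byte fails the byte test: 1, and `Accessible.last` fails
        rw [if_pos hle] at hrax
        refine Vorbis.Spec.range_bad.post_bad w_mem w_kept (by rfl) w_zmm w_mxcsr hrax ?_
        intro hacc
        have hl := hacc.last
        unfold ByteOK ByteOKv shadowByte at hl
        omega
      · -- the last byte passes the byte test: 0, accessible
        rw [if_neg hle] at hrax
        refine Vorbis.Spec.range_bad.post_good w_mem w_kept (by rfl) w_zmm w_mxcsr hrax ?_
        refine ⟨by omega, ?_, ?_⟩
        · intro j hj1 hj2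
          exact hfull j hj1 (by omega)
        · unfold ByteOK ByteOKv shadowByte
          omega
    · -- 0x100221, the back edge (`g++` after `shadow_at(g) == 0`): granule g has shadow 0 too
      have hgn : (UInt64.ofNat g).toNat = g := by u_omega
      rw [hgn, toNat_shr3, hlast] at hbr_10022f
      rw [Vorbis.Spec.range_bad.readLE_granule _ _ (by omega)] at hbr_100238
      have hs := shadowOf_lt u.mem g
      u_loop_back [g + 1]
      · rw [w_rdi, UInt64.ofNat_add]
        rfl
      · omega
      · omega
      · -- the granules found clear so far
        intro j hj1 hj2
        by_cases hjg : j = g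
        · rw [hjg]
          omega
        · exact hfull j hj1 (by omega)
      · -- the direction flag: the `add` wrote status flags only
        rw [w_flags]
        simp only [X86.User.df_setStatus]
        exact hdf
      · -- the measure
        rw [w_rdi]
        u_omega
    · -- 0x10023f, asan_rt.c:70 `if (shadow_at(g) != 0) return 1`, g before the last granule: `Accessible.full` fails
      have hgn : (UInt64.ofNat g).toNat = g := by u_omega
      rw [hgn, toNat_shr3, hlast] at hbr_10022f
      rw [Vorbis.Spec.range_bad.readLE_granule _ _ (by omega)] at hbr_100238
      have hs := shadowOf_lt u.mem g
      have hdf' : s_10023f.flags .df = false := by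
        rw [w_flags]
        simp only [X86.User.df_setStatus]
        exact hdf
      have hmx' : s_10023f.mxcsr &&& 0x1F80 = 0x1F80 := by
        rw [w_mxcsr]
        exact hmx
      have hrax : (s_10023f.reg .rax).toNat = 1 := by
        rw [w_rax]
        rfl
      refine ReachVia.done (Or.inl ?_)
      refine Vorbis.Spec.range_bad.returned_of w_rip w_rsp w_kept (by rfl) w_mem w_eq hdf' hmx' ?_
      refine Vorbis.Spec.range_bad.post_bad w_mem w_kept (by rfl) w_zmm w_mxcsr hrax ?_
      intro hacc
      have hz := hacc.full g hg1 hbr_10022f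
      omega
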